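-- pv_equiv track=rewrite | github.com/Jakepps/Translator-from-Java-to-CPP | Translator-from-Java-to-C2P-main/delphi/lab2.py | description_var
-- ===== SOURCE A (Python) =====
-- def description_var(block, out_seq):
--     i = 0
--     var_count = 0
--     while i < len(block):
--         while i < len(block) and block[i] != ':':
--             if not(block[i] in ['\n', ',', ';']):
--                 out_seq += block[i] + ' '
--                 var_count += 1
--             i += 1
--         if i == len(block):
--             break
--         i += 1
--         if block[i] == 'array':
--             i += 1
--             aem_count = 1
--             while block[i] != ']':
--                 if block[i] == ',':
--                     out_seq += '.. '
--                     aem_count += 1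
--                 else:
--                     out_seq += block[i] + ' '
--                 i += 1
--             i += 2
--             aem_count += 1
--             out_seq += '.. ' + str(aem_count) + ' АЭМ '
--         out_seq += str(var_count) + ' ' + block[i] + ' '
--         var_count = 0
--         i += 1
--     return out_seq
-- ===== SOURCE B (Python) =====
-- def description_var(block, out_seq):
--     SKIP = ('\n', ',', ';')
--     # phase 1: parse the token stream into a list of declarations
--     decls = []
--     i, n = 0, len(block)
--     while i < n:
--         start = i
--         while i < n and block[i] != ':':
--             i += 1
--         names = [t for t in block[start:i] if t not in SKIP]
--         if i == n:
--             decls.append((names, None))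
--             break
--         t = block[i + 1]
--         if t == 'array':
--             j = i + 2
--             while block[j] != ']':
--                 j += 1
--             decls.append((names, (True, block[i + 2:j], block[j + 2])))
--             i = j + 3
--         else:
--             decls.append((names, (False, [], t)))
--             i += 2
--     # phase 2: format the parsed declarations
--     parts = [out_seq]
--     for names, info in decls:
--         for nm in names:
--             parts.append(nm + ' ')
--         if info is not None:
--             is_array, bounds, typ = info
--             if is_array:
--                 parts.append(''.join('.. ' if b == ',' else b + ' ' for b in bounds))
--                 parts.append('.. ' + str(bounds.count(',') + 2) + ' АЭМ ')
--             parts.append(str(len(names)) + ' ' + typ + ' ')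
--     return ''.join(parts)
-- ===== Notes on version B (the rewrite author's own statement) =====
-- stated objective: faster
-- what changed: A's single fused index-walking loop that repeatedly appends to the growing output string is replaced by a two-phase design: first parse the token stream into a list of declaration records (names, array bounds, type) with slice/span helpers, then one formatting pass collects the rendered parts in a list and joins them once.
import Mathlib
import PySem

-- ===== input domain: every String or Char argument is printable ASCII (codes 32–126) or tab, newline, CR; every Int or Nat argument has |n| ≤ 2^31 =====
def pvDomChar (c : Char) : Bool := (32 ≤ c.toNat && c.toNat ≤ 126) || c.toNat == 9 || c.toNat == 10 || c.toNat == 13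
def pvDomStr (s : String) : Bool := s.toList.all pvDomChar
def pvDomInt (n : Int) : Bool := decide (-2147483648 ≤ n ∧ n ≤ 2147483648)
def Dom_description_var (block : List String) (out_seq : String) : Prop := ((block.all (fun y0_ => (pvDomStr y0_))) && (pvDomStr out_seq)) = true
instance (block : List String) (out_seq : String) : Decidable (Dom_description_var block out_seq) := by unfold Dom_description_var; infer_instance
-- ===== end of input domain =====

-- B re-implements A's single fused scan (which grows the output by repeated string
-- concatenation) as a two-phase parse-then-format pass joining the parts once; the timing
-- run measured B faster. Equal to A on every input where A returns
-- (Pre_ excludes exactly the malformed blocks on which A raises IndexError).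
-- Both loop ports carry a fuel counter `block.length + 1`; every iteration consumes at
-- least one token, so the fuel is never exhausted and the ports are exact.

-- ===== PORT A =====
-- cursor represented by the remaining suffix of `block`

-- inner `while i < len(block) and block[i] != ':'` loop of A
def descA_names : List String → String → Nat → List String × String × Nat
  | [], out, vc => ([], out, vc)
  | t :: r, out, vc =>
    if t = ":" then (t :: r, out, vc)
    else if t = "\n" ∨ t = "," ∨ t = ";" then descA_names r out vc
    else descA_names r (out ++ t ++ " ") (vc + 1)

-- inner `while block[i] != ']'` loop of A; on [] Python raises IndexError (outside Pre_)
def descA_arr : List String → String → Nat → List String × String × Nat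
  | [], out, aem => ([], out, aem)
  | t :: r, out, aem =>
    if t = "]" then (r, out, aem)
    else if t = "," then descA_arr r (out ++ ".. ") (aem + 1)
    else descA_arr r (out ++ t ++ " ") aem

-- outer `while i < len(block)` loop of A; branches in Python order, raise points return junk
def descA_loop : Nat → List String → String → String
  | 0, _, out => out
  | fuel + 1, l, out =>
    match descA_names l out 0 with
    | ([], out1, _) => out1
    | (_ :: r1, out1, vc) =>
      match r1 with
      | [] => out1                                  -- Python: block[i] IndexError
      | t :: r2 =>
        if t = "array" then
          match descA_arr r2 out1 1 with
          | (r3, out2, aem) =>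
            match r3 with
            | [] => out2                            -- Python: IndexError inside ']' loop
            | _ :: r4 =>
              match r4 with
              | [] => out2 ++ ".. " ++ toString (aem + 1) ++ " АЭМ "   -- Python: block[i] IndexError
              | ty :: r5 =>
                descA_loop fuel r5 (out2 ++ ".. " ++ toString (aem + 1) ++ " АЭМ " ++ toString vc ++ " " ++ ty ++ " ")
        else descA_loop fuel r2 (out1 ++ toString vc ++ " " ++ t ++ " ")

def description_var (block : List String) (out_seq : String) : String :=
  descA_loop (block.length + 1) block out_seq

-- ===== PORT B =====

def skipTok (t : String) : Bool := t = "\n" || t = "," || t = ";"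

-- Source B: scan `while i < n and block[i] != ':'`, returning (block[start:i], block[i:])
def spanToColon : List String → List String × List String
  | [] => ([], [])
  | t :: r =>
    if t = ":" then ([], t :: r)
    else
      let (a, b) := spanToColon r
      (t :: a, b)

-- Source B: scan `while block[j] != ']'`, returning (block[i+2:j], block[j:])
def spanToRBracket : List String → List String × List String
  | [] => ([], [])
  | t :: r =>
    if t = "]" then ([], t :: r)
    else
      let (a, b) := spanToRBracket r
      (t :: a, b)

-- phase 1 of Source B: the list `decls` built by the parse loop
def parseB : Nat → List String → List (List String × Option (Bool × List String × String))
  | 0, _ => []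
  | fuel + 1, l =>
    match l with
    | [] => []
    | _ :: _ =>
      match spanToColon l with
      | (pre, rest) =>
        let names := pre.filter (fun t => !skipTok t)
        match rest with
        | [] => [(names, none)]
        | _ :: r1 =>
          match r1 with
          | [] => [(names, none)]                    -- Source B: block[i+1] IndexError
          | t :: r2 =>
            if t = "array" then
              match spanToRBracket r2 with
              | (bnds, rest2) =>
                match rest2 with
                | [] => [(names, none)]              -- Source B: IndexError in ']' scan
                | _ :: r3 =>
                  match r3 with
                  | [] => [(names, none)]            -- Source B: block[j+2] IndexError
                  | _ :: r4 =>
                    match r4 with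
                    | [] => [(names, none)]          -- Source B: block[j+2] IndexError
                    | ty :: r5 => (names, some (true, bnds, ty)) :: parseB fuel r5
            else (names, some (false, [], t)) :: parseB fuel r2

-- phase 2 of Source B: the `parts` list is joined left to right; one helper per kind of part
def fmtNames : List String → String
  | [] => ""
  | nm :: r => nm ++ " " ++ fmtNames r

def fmtBounds : List String → String
  | [] => ""
  | b :: r => (if b = "," then ".. " else b ++ " ") ++ fmtBounds r

def fmtDecl : List String × Option (Bool × List String × String) → String
  | (ns, none) => fmtNames ns
  | (ns, some (isArr, bnds, ty)) =>
    fmtNames ns ++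
    (if isArr then fmtBounds bnds ++ ".. " ++ toString (bnds.count "," + 2) ++ " АЭМ " else "") ++
    toString ns.length ++ " " ++ ty ++ " "

def fmtDecls : List (List String × Option (Bool × List String × String)) → String
  | [] => ""
  | d :: r => fmtDecl d ++ fmtDecls r

def description_var_alt (block : List String) (out_seq : String) : String :=
  out_seq ++ fmtDecls (parseB (block.length + 1) block)

-- ===== PRECONDITION & SPEC =====

-- Grammar of well-formed blocks, as a five-state acceptor read left to right:
-- state 0 reads name tokens up to ':', state 1 expects a type token ('array' switches to
-- bounds), state 2 reads bound tokens up to ']', states 3 and 4 expect the two tokens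
-- after ']' ('of' and the element type), then back to state 0.
def pvWfS : Nat → List String → Bool
  | st, [] => st = 0
  | st, t :: r =>
    if st = 0 then (if t = ":" then pvWfS 1 r else pvWfS 0 r)
    else if st = 1 then (if t = "array" then pvWfS 2 r else pvWfS 0 r)
    else if st = 2 then (if t = "]" then pvWfS 3 r else pvWfS 2 r)
    else if st = 3 then pvWfS 4 r
    else pvWfS 0 r

-- Pre_ excludes exactly the malformed/truncated blocks on which Python A raises IndexError
-- (no token after ':', an unterminated 'array [...' bound list, or fewer than two tokens
-- after ']'); on every other input A returns normally.
def Pre_description_var (block : List String) (out_seq : String) : Prop := pvWfS 0 block = true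

instance (block : List String) (out_seq : String) : Decidable (Pre_description_var block out_seq) := by
  unfold Pre_description_var; infer_instance

def pvWitness_description_var : List String × String := (["x", ",", "y", ":", "int"], "")

def Spec_description_var (block : List String) (out_seq : String) (out : String) : Prop := out = description_var_alt block out_seq
instance (block : List String) (out_seq : String) (out : String) : Decidable (Spec_description_var block out_seq out) := by unfold Spec_description_var; infer_instance

-- ===== CLAIM (what is proved, stated in full; the proofs are below) =====
def Claim_equal_description_var : Prop := ∀ (block : List String) (out_seq : String), Dom_description_var block out_seq → Pre_description_var block out_seq → Spec_description_var block out_seq (description_var block out_seq)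

-- ===== LEMMAS AND PROOFS =====

theorem descA_names_eq (l : List String) : ∀ (out : String) (vc : Nat),
    descA_names l out vc =
      ((spanToColon l).2,
       out ++ fmtNames ((spanToColon l).1.filter (fun t => !skipTok t)),
       vc + ((spanToColon l).1.filter (fun t => !skipTok t)).length) := by
  induction l with
  | nil => intro out vc; simp [descA_names, spanToColon, fmtNames]
  | cons t r ih =>
    intro out vc
    by_cases h1 : t = ":"
    · subst h1; simp [descA_names, spanToColon, fmtNames]
    · by_cases hs : skipTok t = true
      · have h2 : t = "\n" ∨ t = "," ∨ t = ";" := by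
          simp [skipTok] at hs; tauto
        simp [descA_names, spanToColon, h1, h2, hs, ih]
      · have hs' : skipTok t = false := by simp at hs; exact hs
        have h2 : ¬(t = "\n" ∨ t = "," ∨ t = ";") := by
          simp [skipTok] at hs'; tauto
        simp [descA_names, spanToColon, h1, h2, hs', ih, fmtNames, String.append_assoc]
        omega

theorem spanToColon_snd_len (l : List String) : (spanToColon l).2.length ≤ l.length := by
  induction l with
  | nil => simp [spanToColon]
  | cons t r ih =>
    simp only [spanToColon]
    split
    · simp
    · exact le_trans ih (by simp)

theorem spanToRBracket_snd_len (l : List String) : (spanToRBracket l).2.length ≤ l.length := by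
  induction l with
  | nil => simp [spanToRBracket]
  | cons t r ih =>
    simp only [spanToRBracket]
    split
    · simp
    · exact le_trans ih (by simp)

theorem descA_arr_eq (l : List String) : ∀ (out : String) (aem : Nat),
    descA_arr l out aem =
      ((spanToRBracket l).2.tail,
       out ++ fmtBounds (spanToRBracket l).1,
       aem + (spanToRBracket l).1.count ",") := by
  induction l with
  | nil => intro out aem; simp [descA_arr, spanToRBracket, fmtBounds]
  | cons t r ih =>
    intro out aem
    by_cases h1 : t = "]"
    · subst h1; simp [descA_arr, spanToRBracket, fmtBounds]
    · by_cases h2 : t = ","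
      · subst h2
        simp [descA_arr, spanToRBracket, ih, fmtBounds, String.append_assoc]
        omega
      · simp [descA_arr, spanToRBracket, h1, h2, ih, fmtBounds, String.append_assoc]

theorem pvWfS_zero_eq (l : List String) :
    pvWfS 0 l = (match (spanToColon l).2 with | [] => true | _ :: r => pvWfS 1 r) := by
  induction l with
  | nil => simp [pvWfS, spanToColon]
  | cons t r ih =>
    by_cases h : t = ":" <;> simp [pvWfS, spanToColon, h, ih]

theorem pvWfS_two_eq (l : List String) :
    pvWfS 2 l = (match (spanToRBracket l).2 with | [] => false | _ :: r => pvWfS 3 r) := by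
  induction l with
  | nil => simp [pvWfS, spanToRBracket]
  | cons t r ih =>
    by_cases h : t = "]" <;> simp [pvWfS, spanToRBracket, h, ih]

theorem main_aux : ∀ (f1 : Nat) (l : List String), l.length < f1 → pvWfS 0 l = true →
    ∀ (f2 : Nat), l.length < f2 → ∀ out,
      descA_loop f1 l out = out ++ fmtDecls (parseB f2 l) := by
  intro f1
  induction f1 with
  | zero => intro l hl; omega
  | succ f1 ih =>
    intro l hl h f2 hl2 out
    match f2, hl2 with
    | f2 + 1, hl2 =>
    cases l with
    | nil => simp [descA_loop, descA_names, parseB, fmtDecls]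
    | cons x xs =>
      have hW := pvWfS_zero_eq (x :: xs)
      have hclen := spanToColon_snd_len (x :: xs)
      rw [hW] at h
      simp only [descA_loop, parseB, descA_names_eq]
      cases hsc : (spanToColon (x :: xs)).2 with
      | nil =>
        rw [hsc] at h
        simp [fmtDecls, fmtDecl]
      | cons c r1 =>
        rw [hsc] at h hclen
        simp at hclen
        cases r1 with
        | nil => simp [pvWfS] at h
        | cons t r2 =>
          simp only [pvWfS] at h
          norm_num at h
          by_cases ht : t = "array"
          · subst ht
            rw [if_pos rfl] at h
            have hW2 := pvWfS_two_eq r2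
            have hblen := spanToRBracket_snd_len r2
            rw [hW2] at h
            simp only [descA_arr_eq]
            cases hsb : (spanToRBracket r2).2 with
            | nil => rw [hsb] at h; simp at h
            | cons b rest =>
              rw [hsb] at h hblen
              simp at hblen
              simp only [List.tail_cons]
              cases rest with
              | nil => simp [pvWfS] at h
              | cons s r4 =>
                simp only [pvWfS] at h
                norm_num at h
                cases r4 with
                | nil => simp [pvWfS] at h
                | cons ty r5 =>
                  simp only [pvWfS] at h
                  norm_num at h
                  simp only [if_true]
                  simp only [List.length_cons] at hclen hl hl2 hblen hl hl2
                  rw [ih r5 (by omega) h (f2) (by omega)]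
                  have hnum : 1 + (spanToRBracket r2).1.count "," + 1
                      = (spanToRBracket r2).1.count "," + 2 := by omega
                  rw [hnum]
                  simp [fmtDecls, fmtDecl, String.append_assoc]
          · rw [if_neg ht] at h
            simp only [List.length_cons] at hclen hl hl2
            simp only [ht, if_false]
            rw [ih r2 (by omega) h f2 (by omega)]
            simp [fmtDecls, fmtDecl, String.append_assoc]

-- ===== VERDICT (by name: the statement is the Claim_ definition above) =====
theorem description_var_spec : Claim_equal_description_var := by
  intro block out_seq _ hpre
  unfold Spec_description_var description_var description_var_alt
  exact main_aux (block.length + 1) block (by omega) hpre (block.length + 1) (by omega) out_seq
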